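-- pv_equiv track=rewrite | github.com/AlexandarEfremov/python_fundamentals_homework | text_processing/extract_person_information.py | age_check
-- ===== SOURCE A (Python) =====
-- def age_check(string):
--     age = ""
--     for index, letter in enumerate(string):
--         if letter == "#":
--             rest_string = string[index + 1:]
--             for i in rest_string:
--                 if i == "*":
--                     break
--                 age += i
--     return age
-- ===== SOURCE B (Python) =====
-- def age_check(string):
--     pieces = []
--     for seg in string.split('*'):
--         for j, ch in enumerate(seg):
--             if ch == '#':
--                 pieces.append(seg[j + 1:])
--     return ''.join(pieces)
-- ===== Notes on version B (the rewrite author's own statement) =====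
-- stated objective: alternative
-- what changed: B splits the input once on the star separator into segments and, for each hash marker found in a segment, appends the remainder of that segment (collected in a list joined at the end), instead of A's per-marker rescan of the whole remaining string accumulating characters one by one until the next separator.
import Mathlib
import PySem

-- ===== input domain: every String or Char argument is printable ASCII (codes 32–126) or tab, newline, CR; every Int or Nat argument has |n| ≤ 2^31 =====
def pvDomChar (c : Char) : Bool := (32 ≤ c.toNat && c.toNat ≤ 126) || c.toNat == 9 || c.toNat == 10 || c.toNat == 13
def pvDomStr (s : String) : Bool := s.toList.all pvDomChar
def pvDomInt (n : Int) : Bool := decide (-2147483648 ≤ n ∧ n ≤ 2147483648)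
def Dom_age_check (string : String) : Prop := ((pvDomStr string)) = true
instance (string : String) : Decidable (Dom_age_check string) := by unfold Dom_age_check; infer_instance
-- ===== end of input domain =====

-- B splits once on '*' and appends the rest-of-segment after each '#'; A rescans the
-- remaining string after each '#' character by character until the next '*' (alternative decomposition).

-- ===== PORT A =====
-- inner 'for i in rest_string: if i == "*": break; age += i' loop of A
def pvAgeTake (age : List Char) : List Char → List Char
  | [] => age
  | i :: rest => if i = '*' then age else pvAgeTake (age ++ [i]) rest

def age_check (string : String) : String :=
  let cs := string.toList
  let age := (PySem.List.enumerate cs).foldl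
    (fun age p =>
      if p.2 = '#' then pvAgeTake age (PySem.List.slice cs (some (p.1 + 1)) none)
      else age) []
  String.mk age

-- ===== PORT B =====
def age_check_alt (string : String) : String :=
  let segs := PySem.Chars.splitOn string.toList ['*']
  let pieces := segs.foldl
    (fun pieces seg =>
      (PySem.List.enumerate seg).foldl
        (fun ps p =>
          if p.2 = '#' then ps ++ [PySem.List.slice seg (some (p.1 + 1)) none]
          else ps) pieces) []
  String.mk (PySem.Chars.join [] pieces)

-- ===== PRECONDITION & SPEC =====
def Spec_age_check (string : String) (out : String) : Prop := out = age_check_alt string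
instance (string : String) (out : String) : Decidable (Spec_age_check string out) := by unfold Spec_age_check; infer_instance

-- ===== CLAIM (what is proved, stated in full; the proofs are below) =====
def Claim_equal_age_check : Prop := ∀ (string : String), Dom_age_check string → Spec_age_check string (age_check string)

-- ===== LEMMAS AND PROOFS =====

-- reference: A's total contribution over a suffix
def pvGA : List Char → List Char
  | [] => []
  | c :: t => (if c = '#' then t.takeWhile (fun x => x ≠ '*') else []) ++ pvGA t

-- reference: B's flattened contribution for one segment
def pvHB : List Char → List Char
  | [] => []
  | c :: t => (if c = '#' then t else []) ++ pvHB t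

-- reference: B's list of pieces for one segment
def pvPB : List Char → List (List Char)
  | [] => []
  | c :: t => (if c = '#' then [t] else []) ++ pvPB t

-- reference split on '*'
def pvSp : List Char → List (List Char)
  | [] => [[]]
  | c :: t => if c = '*' then [] :: pvSp t else (pvSp t).modifyHead (c :: ·)

theorem pvAgeTake_eq (l : List Char) : ∀ age, pvAgeTake age l = age ++ l.takeWhile (fun x => x ≠ '*') := by
  induction l with
  | nil => intro age; simp [pvAgeTake]
  | cons c t ih =>
    intro age
    by_cases h : c = '*' <;> simp [pvAgeTake, h, ih]

theorem pvSliceSucc (cs : List Char) (k : Nat) :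
    PySem.List.slice cs (some ((k : Int) + 1)) none = cs.drop (k + 1) := by
  have h : PySem.List.slice cs (some ((k : Int) + 1)) none = cs.drop ((k : Int) + 1).toNat :=
    PySem.List.slice_from cs (by positivity)
  simpa using h

theorem pvA_fold (cs : List Char) : ∀ (l : List Char) (k : Nat) (age : List Char),
    cs.drop k = l →
    (PySem.List.enumerate l (k : Int)).foldl
      (fun age p =>
        if p.2 = '#' then pvAgeTake age (PySem.List.slice cs (some (p.1 + 1)) none)
        else age) age = age ++ pvGA l := by
  intro l
  induction l with
  | nil => intro k age _; simp [PySem.List.enumerate_nil, pvGA]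
  | cons c t ih =>
    intro k age hk
    have ht : cs.drop (k + 1) = t := by
      have := congrArg (List.drop 1) hk
      simpa [List.drop_drop, Nat.add_comm] using this
    rw [PySem.List.enumerate_cons, List.foldl_cons]
    have hcast : (k : Int) + 1 = ((k + 1 : Nat) : Int) := by push_cast; ring
    rw [hcast, ih (k + 1) _ ht]
    by_cases h : c = '#' <;>
      simp [h, pvGA, pvSliceSucc, ht, pvAgeTake_eq, List.append_assoc]

theorem pvB_inner (seg : List Char) : ∀ (l : List Char) (k : Nat) (ps : List (List Char)),
    seg.drop k = l →
    (PySem.List.enumerate l (k : Int)).foldl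
      (fun ps p =>
        if p.2 = '#' then ps ++ [PySem.List.slice seg (some (p.1 + 1)) none]
        else ps) ps = ps ++ pvPB l := by
  intro l
  induction l with
  | nil => intro k ps _; simp [PySem.List.enumerate_nil, pvPB]
  | cons c t ih =>
    intro k ps hk
    have ht : seg.drop (k + 1) = t := by
      have := congrArg (List.drop 1) hk
      simpa [List.drop_drop, Nat.add_comm] using this
    rw [PySem.List.enumerate_cons, List.foldl_cons]
    have hcast : (k : Int) + 1 = ((k + 1 : Nat) : Int) := by push_cast; ring
    rw [hcast, ih (k + 1) _ ht]
    by_cases h : c = '#' <;>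
      simp [h, pvPB, pvSliceSucc, ht, List.append_assoc]

theorem pvB_outer (segs : List (List Char)) : ∀ (acc : List (List Char)),
    segs.foldl
      (fun pieces seg =>
        (PySem.List.enumerate seg).foldl
          (fun ps p =>
            if p.2 = '#' then ps ++ [PySem.List.slice seg (some (p.1 + 1)) none]
            else ps) pieces) acc = acc ++ segs.flatMap pvPB := by
  induction segs with
  | nil => intro acc; simp
  | cons seg rest ih =>
    intro acc
    rw [List.foldl_cons]
    have h0 : (PySem.List.enumerate seg ((0 : Nat) : Int)).foldl
        (fun ps p =>
          if p.2 = '#' then ps ++ [PySem.List.slice seg (some (p.1 + 1)) none]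
          else ps) acc = acc ++ pvPB seg := pvB_inner seg seg 0 acc (by simp)
    simp only [Int.natCast_zero] at h0
    rw [h0, ih, List.flatMap_cons, List.append_assoc]

theorem pvPB_flatten (l : List Char) : (pvPB l).flatten = pvHB l := by
  induction l with
  | nil => rfl
  | cons c t ih => by_cases h : c = '#' <;> simp [pvPB, pvHB, h, ih]

theorem pvSp_ne_nil (l : List Char) : pvSp l ≠ [] := by
  cases l with
  | nil => simp [pvSp]
  | cons c t =>
    by_cases h : c = '*'
    · simp [pvSp, h]
    · simp only [pvSp, h]
      cases hsp : pvSp t with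
      | nil => exact absurd hsp (pvSp_ne_nil t)
      | cons a b => simp

theorem pvSp_head (l : List Char) : (pvSp l).head? = some (l.takeWhile (fun x => x ≠ '*')) := by
  induction l with
  | nil => simp [pvSp]
  | cons c t ih =>
    by_cases h : c = '*'
    · simp [pvSp, h]
    · cases hsp : pvSp t with
      | nil => exact absurd hsp (pvSp_ne_nil t)
      | cons a b =>
        rw [hsp] at ih
        simp only [List.head?_cons, Option.some.injEq] at ih
        simp [pvSp, h, hsp, ih]

theorem pvGA_eq_sp (l : List Char) : pvGA l = ((pvSp l).map pvHB).flatten := by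
  induction l with
  | nil => simp [pvGA, pvSp, pvHB]
  | cons c t ih =>
    by_cases h : c = '*'
    · have hc : c ≠ '#' := by rw [h]; decide
      simp [pvGA, pvSp, h, pvHB, ih]
    · cases hsp : pvSp t with
      | nil => exact absurd hsp (pvSp_ne_nil t)
      | cons a b =>
        have ha : a = t.takeWhile (fun x => x ≠ '*') := by
          have := pvSp_head t; rw [hsp] at this; simpa using this
        rw [hsp] at ih
        by_cases hc : c = '#' <;>
          simp [pvGA, pvSp, h, hsp, hc, pvHB, ih, ha, List.append_assoc]

theorem pvGo_spec : ∀ (fuel : Nat) (l cur : List Char) (accs : List (List Char)),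
    l.length ≤ fuel →
    PySem.Chars.splitOn.go ['*'] fuel l cur accs =
      accs.reverse ++ (pvSp l).modifyHead (cur.reverse ++ ·) := by
  intro fuel
  induction fuel with
  | zero =>
    intro l cur accs h
    have hl : l = [] := List.eq_nil_of_length_eq_zero (Nat.le_zero.mp h)
    subst hl
    simp [PySem.Chars.splitOn.go, pvSp]
  | succ f ih =>
    intro l cur accs h
    cases l with
    | nil => simp [PySem.Chars.splitOn.go, pvSp]
    | cons c rest =>
      simp only [PySem.Chars.splitOn.go]
      by_cases hc : c = '*'
      · have hpre : ['*'].isPrefixOf (c :: rest) = true := by simp [List.isPrefixOf, hc]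
        rw [if_pos hpre, ih _ _ _ (by simpa using h)]
        simp [pvSp, hc, List.modifyHead]
        cases pvSp rest <;> simp
      · have hpre : ¬ (['*'].isPrefixOf (c :: rest) = true) := by simp [List.isPrefixOf]; exact fun hx => hc hx.symm
        rw [if_neg hpre, ih _ _ _ (by simpa using h)]
        simp only [pvSp, if_neg hc, List.modifyHead_modifyHead]
        have hfun : (fun x => (c :: cur).reverse ++ x) = ((fun x => cur.reverse ++ x) ∘ fun x => c :: x) := by
          funext x; simp
        rw [hfun]

theorem pvSplitOn_eq_sp (cs : List Char) : PySem.Chars.splitOn cs ['*'] = pvSp cs := by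
  rw [PySem.Chars.splitOn, pvGo_spec (cs.length + 1) cs [] [] (Nat.le_succ _)]
  cases h : pvSp cs with
  | nil => exact absurd h (pvSp_ne_nil cs)
  | cons a b => simp [List.modifyHead]

theorem pvFlatMap_eq (segs : List (List Char)) :
    (segs.flatMap pvPB).flatten = (segs.map pvHB).flatten := by
  induction segs with
  | nil => simp
  | cons a t ih => simp [List.flatMap_cons, List.flatten_append, ih, pvPB_flatten]

theorem pvJoin_nil_eq_flatten (ps : List (List Char)) : PySem.Chars.join [] ps = ps.flatten := by
  induction ps with
  | nil => simp [PySem.Chars.join, List.intercalate]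
  | cons a t ih =>
    cases t with
    | nil => simp [PySem.Chars.join, List.intercalate]
    | cons b u =>
      simp only [PySem.Chars.join, List.intercalate] at ih ⊢
      rw [List.intersperse_cons₂]
      simp [ih]

-- ===== VERDICT (by name: the statement is the Claim_ definition above) =====
theorem age_check_spec : Claim_equal_age_check := by
  intro s _
  unfold Spec_age_check age_check age_check_alt
  simp only []
  have hA := pvA_fold s.toList s.toList 0 [] (by simp)
  simp only [Int.natCast_zero] at hA
  rw [hA, pvB_outer, pvSplitOn_eq_sp, pvJoin_nil_eq_flatten]
  simp only [List.nil_append]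
  rw [pvGA_eq_sp, ← pvFlatMap_eq (pvSp s.toList)]
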